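-- pv_equiv track=rewrite | github.com/nexuswho/litcoder | python/Contests/Module 2/task_schedule.py | min_time_to_complete_tasks
-- ===== SOURCE A (Python) =====
-- def min_time_to_complete_tasks(tasks, workers):
--     left, right = max(tasks), sum(tasks)
--
--     def is_valid(mid):
--         count_workers = 1
--         curr_time = 0
--
--         for task in tasks:
--             curr_time += task
--             if curr_time > mid:
--                 curr_time = task
--                 count_workers += 1
--
--         return count_workers <= workers
--
--     while left < right:
--         mid = (left + right) // 2
--
--         if is_valid(mid):
--             right = mid
--         else:
--             left = mid + 1
--
--     return left
-- ===== SOURCE B (Python) =====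
-- def min_time_to_complete_tasks(tasks, workers):
--     def groups(mid):
--         # greedy segmentation: each group opens with one task and extends
--         # while the running sum stays within mid
--         count, i, n = 0, 0, len(tasks)
--         while i < n:
--             acc = tasks[i]
--             i += 1
--             while i < n and acc + tasks[i] <= mid:
--                 acc += tasks[i]
--                 i += 1
--             count += 1
--         return count
--
--     def search(lo, hi):
--         if lo >= hi:
--             return lo
--         mid = (lo + hi) // 2
--         return search(lo, mid) if groups(mid) <= workers else search(mid + 1, hi)
--
--     return search(max(tasks), sum(tasks))
-- ===== Notes on version B (the rewrite author's own statement) =====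
-- stated objective: alternative
-- what changed: A's exact value on lists with negative tasks is the path-dependent outcome of integer bisection over a NON-monotone predicate, which pins the probe sequence; B keeps that bisection but recasts it as pure recursion on the interval (no mutable left/right) and computes the worker count by greedy maximal-group segmentation (an outer loop per group with an inner extension loop) instead of A's single reset-scan carrying a (curr_time, count) state, and B drops A's double-count of a first task exceeding mid, which no probed midpoint (all are >= max(tasks)) can reach.
import Mathlib
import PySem

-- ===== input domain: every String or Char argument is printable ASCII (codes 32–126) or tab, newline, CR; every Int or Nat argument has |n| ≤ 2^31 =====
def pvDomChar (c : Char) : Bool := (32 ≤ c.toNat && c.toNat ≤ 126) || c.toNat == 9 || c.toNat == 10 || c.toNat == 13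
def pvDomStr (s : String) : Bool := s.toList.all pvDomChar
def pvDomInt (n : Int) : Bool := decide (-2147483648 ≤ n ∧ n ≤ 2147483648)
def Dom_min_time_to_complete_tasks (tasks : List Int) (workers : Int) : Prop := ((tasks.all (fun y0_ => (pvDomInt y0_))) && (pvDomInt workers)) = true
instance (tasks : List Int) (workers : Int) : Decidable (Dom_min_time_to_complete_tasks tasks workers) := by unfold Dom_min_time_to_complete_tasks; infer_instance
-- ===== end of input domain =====

-- B keeps A's bisection (its exact value on non-monotone, negative-task instances pins the probe
-- sequence) but as pure interval recursion, with the worker count computed by greedy maximal-group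
-- segmentation instead of A's single reset-scan (objective: alternative, not faster).

-- ===== PORT A =====
-- is_valid(mid): one pass over tasks carrying (curr_time, count_workers), started at (0, 1)
def pvA_isValid (tasks : List Int) (workers mid : Int) : Bool :=
  let st := tasks.foldl
    (fun (p : Int × Int) task =>
      if p.1 + task > mid then (task, p.2 + 1) else (p.1 + task, p.2)) (0, 1)
  st.2 ≤ workers

-- the 'while left < right' binary-search loop of A
def pvA_loop (tasks : List Int) (workers left right : Int) : Int :=
  if h : left < right then
    if pvA_isValid tasks workers (PySem.Int.floordiv (left + right) 2) then
      pvA_loop tasks workers left (PySem.Int.floordiv (left + right) 2)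
    else pvA_loop tasks workers (PySem.Int.floordiv (left + right) 2 + 1) right
  else left
termination_by (right - left).toNat
decreasing_by
  · have hb := PySem.Int.floordiv_two_mid_bounds (le_of_lt h)
    have hm : PySem.Int.floordiv (left + right) 2 < right :=
      (PySem.Int.floordiv_lt_iff_lt_mul (by omega)).2 (by omega)
    omega
  · have hb := PySem.Int.floordiv_two_mid_bounds (le_of_lt h)
    omega

def min_time_to_complete_tasks (tasks : List Int) (workers : Int) : Int :=
  match PySem.List.max? tasks (fun x => x) with
  | none => 0   -- Python: max([]) raises ValueError; excluded by Pre_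
  | some m => pvA_loop tasks workers m tasks.sum

-- ===== PORT B =====
-- B's inner extension loop: drop tasks while the running group sum acc stays within mid
def pvB_shed (mid acc : Int) : List Int → List Int
  | [] => []
  | t :: ts => if acc + t ≤ mid then pvB_shed mid (acc + t) ts else t :: ts

-- termination measure for the outer loop (pvB_shed never lengthens its input)
theorem pvB_shed_length_le (mid acc : Int) (l : List Int) :
    (pvB_shed mid acc l).length ≤ l.length := by
  induction l generalizing acc with
  | nil => simp [pvB_shed]
  | cons t ts ih =>
    simp only [pvB_shed]
    split
    · exact le_trans (ih _) (Nat.le_succ _)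
    · exact le_refl _

-- B's outer loop: one group per iteration (open with the first task, then extend greedily)
def pvB_groups (mid : Int) : List Int → Int
  | [] => 0
  | t :: ts => 1 + pvB_groups mid (pvB_shed mid t ts)
termination_by l => l.length
decreasing_by
  exact Nat.lt_succ_of_le (pvB_shed_length_le mid t ts)

-- B's recursive bisection
def pvB_search (tasks : List Int) (workers lo hi : Int) : Int :=
  if h : lo ≥ hi then lo
  else
    if pvB_groups (PySem.Int.floordiv (lo + hi) 2) tasks ≤ workers then
      pvB_search tasks workers lo (PySem.Int.floordiv (lo + hi) 2)
    else pvB_search tasks workers (PySem.Int.floordiv (lo + hi) 2 + 1) hi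
termination_by (hi - lo).toNat
decreasing_by
  · have hb := PySem.Int.floordiv_two_mid_bounds (le_of_lt (lt_of_not_ge h))
    have hm : PySem.Int.floordiv (lo + hi) 2 < hi :=
      (PySem.Int.floordiv_lt_iff_lt_mul (by omega)).2 (by omega)
    omega
  · have hb := PySem.Int.floordiv_two_mid_bounds (le_of_lt (lt_of_not_ge h))
    omega

def min_time_to_complete_tasks_alt (tasks : List Int) (workers : Int) : Int :=
  match PySem.List.max? tasks (fun x => x) with
  | none => 0   -- Python: max([]) raises ValueError; excluded by Pre_
  | some m => pvB_search tasks workers m tasks.sum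

-- ===== PRECONDITION & SPEC =====
-- Pre_ excludes only the empty list, on which Python A (and B) raises ValueError via max(tasks).
def Pre_min_time_to_complete_tasks (tasks : List Int) (workers : Int) : Prop := tasks ≠ []
instance (tasks : List Int) (workers : Int) : Decidable (Pre_min_time_to_complete_tasks tasks workers) := by unfold Pre_min_time_to_complete_tasks; infer_instance

def pvWitness_min_time_to_complete_tasks : List Int × Int := ([3, 1, 2], 2)

def Spec_min_time_to_complete_tasks (tasks : List Int) (workers : Int) (out : Int) : Prop := out = min_time_to_complete_tasks_alt tasks workers
instance (tasks : List Int) (workers : Int) (out : Int) : Decidable (Spec_min_time_to_complete_tasks tasks workers out) := by unfold Spec_min_time_to_complete_tasks; infer_instance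

-- ===== CLAIM (what is proved, stated in full; the proofs are below) =====
def Claim_equal_min_time_to_complete_tasks : Prop := ∀ (tasks : List Int) (workers : Int), Dom_min_time_to_complete_tasks tasks workers → Pre_min_time_to_complete_tasks tasks workers → Spec_min_time_to_complete_tasks tasks workers (min_time_to_complete_tasks tasks workers)

-- ===== LEMMAS AND PROOFS =====

-- A's reset-scan counter, started mid-group with running sum acc and count k, counts k plus the
-- number of groups B's segmentation forms after first extending the current group (any acc).
theorem pvA_fold_eq_groups (mid : Int) (l : List Int) :
    ∀ acc k : Int,
      (l.foldl (fun (p : Int × Int) task =>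
        if p.1 + task > mid then (task, p.2 + 1) else (p.1 + task, p.2)) (acc, k)).2
      = k + pvB_groups mid (pvB_shed mid acc l) := by
  induction l with
  | nil => intro acc k; simp [pvB_shed, pvB_groups]
  | cons t ts ih =>
    intro acc k
    by_cases hc : acc + t > mid
    · simp only [List.foldl, pvB_shed, if_neg (by omega : ¬ acc + t ≤ mid), if_pos hc]
      rw [ih t (k + 1), pvB_groups]
      ring
    · simp only [List.foldl, pvB_shed, if_pos (by omega : acc + t ≤ mid), if_neg hc]
      exact ih (acc + t) k

-- on any midpoint at least as large as the first task, A's validity test is B's group bound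
theorem pvA_isValid_eq (t : Int) (ts : List Int) (workers mid : Int) (h0 : t ≤ mid) :
    pvA_isValid (t :: ts) workers mid = decide (pvB_groups mid (t :: ts) ≤ workers) := by
  unfold pvA_isValid
  simp only [List.foldl, if_neg (by omega : ¬ (0 : Int) + t > mid)]
  rw [show (0 : Int) + t = t by ring, pvA_fold_eq_groups mid ts t 1]
  rw [show pvB_groups mid (t :: ts) = 1 + pvB_groups mid (pvB_shed mid t ts) by simp [pvB_groups]]

-- the two bisections agree as long as every task is at most lo (A then never probes below max(tasks))
theorem pvLoop_eq_search (t : Int) (ts : List Int) (workers : Int) :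
    ∀ lo hi : Int, t ≤ lo → (∀ x ∈ ts, x ≤ lo) →
      pvA_loop (t :: ts) workers lo hi = pvB_search (t :: ts) workers lo hi := by
  intro lo hi
  induction lo, hi using pvA_loop.induct (t :: ts) workers with
  | case1 lo hi h hv ih =>
    intro h1 h2
    have hb := PySem.Int.floordiv_two_mid_bounds (le_of_lt h)
    have hm : t ≤ PySem.Int.floordiv (lo + hi) 2 := le_trans h1 hb.1
    have hv' : pvB_groups (PySem.Int.floordiv (lo + hi) 2) (t :: ts) ≤ workers := by
      have he := pvA_isValid_eq t ts workers _ hm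
      rw [he] at hv
      exact of_decide_eq_true hv
    rw [pvA_loop, pvB_search, dif_pos h, dif_neg (by omega : ¬ lo ≥ hi), if_pos hv, if_pos hv']
    exact ih h1 h2
  | case2 lo hi h hv ih =>
    intro h1 h2
    have hb := PySem.Int.floordiv_two_mid_bounds (le_of_lt h)
    have hm : t ≤ PySem.Int.floordiv (lo + hi) 2 := le_trans h1 hb.1
    have hv' : ¬ pvB_groups (PySem.Int.floordiv (lo + hi) 2) (t :: ts) ≤ workers := by
      have he := pvA_isValid_eq t ts workers _ hm
      rw [he] at hv
      simpa using hv
    rw [pvA_loop, pvB_search, dif_pos h, dif_neg (by omega : ¬ lo ≥ hi), if_neg hv, if_neg hv']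
    exact ih (by omega) (fun x hx => le_trans (h2 x hx) (by omega))
  | case3 lo hi h =>
    intro _ _
    rw [pvA_loop, pvB_search, dif_neg h, dif_pos (by omega)]

-- ===== VERDICT (by name: the statement is the Claim_ definition above) =====
theorem min_time_to_complete_tasks_spec : Claim_equal_min_time_to_complete_tasks := by
  intro tasks workers _ hpre
  unfold Spec_min_time_to_complete_tasks
  unfold min_time_to_complete_tasks min_time_to_complete_tasks_alt
  cases hmax : PySem.List.max? tasks (fun x => x) with
  | none => rfl
  | some m =>
    have hmem := PySem.List.max?_mem hmax
    have hmaxle := PySem.List.max?_isMax hmax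
    cases tasks with
    | nil => exact absurd rfl hpre
    | cons t ts =>
      exact pvLoop_eq_search t ts workers m (t :: ts).sum
        (hmaxle t (by simp)) (fun x hx => hmaxle x (by simp [hx]))
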